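-- pv_equiv track=rewrite | github.com/harrisonlabollita/w2kplot | spaghetti/core/parse.py | adjustArray
-- ===== SOURCE A (Python) =====
-- def adjustArray(array):
--     # The colors, orbitals, and weights arrays will need to be adjusted, they need to be a nested list instead of a flattened list
--     newArray = []
--     subArray = []
--     for ele in array:
--         if ele != ",":
--             subArray.append(ele)
--         else:
--             newArray.append(subArray)
--             subArray = []
--     return newArray
-- ===== SOURCE B (Python) =====
-- def adjustArray(array):
--     # Repeatedly split at the first comma: take the prefix before it, continue on the rest.
--     # The trailing segment after the last comma is dropped (as in A).
--     array = list(array)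
--     out = []
--     while "," in array:
--         i = array.index(",")
--         out.append(array[:i])
--         array = array[i + 1:]
--     return out
-- ===== Notes on version B (the rewrite author's own statement) =====
-- stated objective: alternative
-- what changed: Replaces the single-pass element-by-element accumulator loop with repeated split-at-first-comma: find the first ',' with index, emit the slice before it, and continue on the slice after it.
import Mathlib
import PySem

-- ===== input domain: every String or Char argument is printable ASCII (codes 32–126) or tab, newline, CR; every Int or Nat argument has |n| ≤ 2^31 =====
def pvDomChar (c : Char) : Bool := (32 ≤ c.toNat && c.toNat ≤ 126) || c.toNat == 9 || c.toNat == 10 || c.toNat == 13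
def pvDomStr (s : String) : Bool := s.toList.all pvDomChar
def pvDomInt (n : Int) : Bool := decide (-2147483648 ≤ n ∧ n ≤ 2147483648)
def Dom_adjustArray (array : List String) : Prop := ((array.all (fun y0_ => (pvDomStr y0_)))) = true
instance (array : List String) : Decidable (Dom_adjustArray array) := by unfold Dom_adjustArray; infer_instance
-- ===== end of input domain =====

-- B replaces A's element-by-element accumulator loop with repeated split-at-first-comma (alternative decomposition, same cost).


-- ===== PORT A =====
-- the loop body: append ele to subArray, or flush subArray into newArray on ","
def adjustArrayStep (st : List (List String) × List String) (ele : String) :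
    List (List String) × List String :=
  if ele ≠ "," then (st.1, st.2 ++ [ele]) else (st.1 ++ [st.2], [])

def adjustArray (array : List String) : List (List String) :=
  (array.foldl adjustArrayStep ([], [])).1

-- ===== PORT B =====
-- while "," in array: i = array.index(","); out.append(array[:i]); array = array[i+1:]
-- (array.index ported via PySem.List.index?, which is none exactly when "," ∉ array,
--  so the `none` branch is the loop exit; slices array[:i], array[i+1:] are take/drop,
--  exact here since 0 ≤ i < array.length)
def adjustArrayAltGo (l : List String) : List (List String) :=
  match h : PySem.List.index? l "," with
  | some i => l.take i :: adjustArrayAltGo (l.drop (i + 1))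
  | none => []
termination_by l.length
decreasing_by
  have := PySem.List.getElem_of_index?_eq_some h
  obtain ⟨hk, -, -⟩ := this
  simp [List.length_drop]; omega

def adjustArray_alt (array : List String) : List (List String) :=
  adjustArrayAltGo array

-- ===== PRECONDITION & SPEC =====
def Spec_adjustArray (array : List String) (out : List (List String)) : Prop := out = adjustArray_alt array
instance (array : List String) (out : List (List String)) : Decidable (Spec_adjustArray array out) := by unfold Spec_adjustArray; infer_instance

-- ===== CLAIM (what is proved, stated in full; the proofs are below) =====
def Claim_equal_adjustArray : Prop := ∀ (array : List String), Dom_adjustArray array → Spec_adjustArray array (adjustArray array)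

-- ===== LEMMAS AND PROOFS =====

-- unfolding B's loop when there is no comma
theorem altGo_of_not_mem (l : List String) (h : "," ∉ l) : adjustArrayAltGo l = [] := by
  have hidx : PySem.List.index? l "," = none := (PySem.List.index?_eq_none_iff l ",").mpr h
  rw [adjustArrayAltGo]
  split
  · rename_i i hi; rw [hidx] at hi; exact absurd hi (by simp)
  · rfl

-- unfolding B's loop at the first comma, when the prefix is comma-free
theorem altGo_of_split (sub rest : List String) (h : "," ∉ sub) :
    adjustArrayAltGo (sub ++ "," :: rest) = sub :: adjustArrayAltGo rest := by
  have hidx : PySem.List.index? (sub ++ "," :: rest) "," = some sub.length :=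
    (PySem.List.index?_eq_some_iff _ _ _).mpr ⟨sub, rest, rfl, rfl, h⟩
  rw [adjustArrayAltGo]
  split
  case h_2 hnone => rw [hidx] at hnone; exact absurd hnone (by simp)
  case h_1 i hi =>
  rw [hidx] at hi
  injection hi with hi
  subst hi
  have htake : (sub ++ "," :: rest).take sub.length = sub := by
    simp
  have hdrop : (sub ++ "," :: rest).drop (sub.length + 1) = rest := by
    have : sub ++ "," :: rest = (sub ++ [","]) ++ rest := by simp
    rw [this]
    have hl : (sub ++ [","]).length = sub.length + 1 := by simp
    rw [← hl]
    exact List.drop_left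
  rw [htake, hdrop]

-- loop invariant connecting A's fold to B's splitter
theorem fold_eq_altGo (l : List String) :
    ∀ (newA : List (List String)) (sub : List String), "," ∉ sub →
      (l.foldl adjustArrayStep (newA, sub)).1 = newA ++ adjustArrayAltGo (sub ++ l) := by
  induction l with
  | nil =>
    intro newA sub h
    simp [altGo_of_not_mem sub h]
  | cons e rest ih =>
    intro newA sub h
    by_cases he : e = ","
    · subst he
      rw [List.foldl_cons]
      have hstep : adjustArrayStep (newA, sub) "," = (newA ++ [sub], []) := by
        simp [adjustArrayStep]
      rw [hstep, ih (newA ++ [sub]) [] (by simp), altGo_of_split sub rest h]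
      simp
    · rw [List.foldl_cons]
      have hstep : adjustArrayStep (newA, sub) e = (newA, sub ++ [e]) := by
        simp [adjustArrayStep, he]
      rw [hstep, ih newA (sub ++ [e]) (by simp [h, Ne.symm he])]
      simp

-- ===== VERDICT (by name: the statement is the Claim_ definition above) =====
theorem adjustArray_spec : Claim_equal_adjustArray := by
  intro array _
  unfold Spec_adjustArray adjustArray adjustArray_alt
  simpa using fold_eq_altGo array [] [] (by simp)
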